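-- pv_equiv track=rewrite | github.com/VirangaWeerabandara/Project_Euler | Project_Euler_Problem_48.py | last_10_digits
-- ===== SOURCE A (Python) =====
-- def last_10_digits(x):
--     digit_list=[]
--     while len (digit_list)<10:
--         num=x%10
--         x=x//10
--         digit_list.append(num)
--     digit_list=[i for i in reversed(digit_list)]
--     string=int("".join(map(str,digit_list)))
--     return string
-- ===== SOURCE B (Python) =====
-- def last_10_digits(x):
--     return x % 10**10
-- ===== Notes on version B (the rewrite author's own statement) =====
-- stated objective: simpler
-- what changed: Replaces the fixed ten-iteration digit-extraction loop (build digit list, reverse, join to a string, re-parse with int) by the closed-form modular expression returning the remainder of x modulo ten to the tenth, which the loop provably computes for every integer including negatives.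
import Mathlib
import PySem

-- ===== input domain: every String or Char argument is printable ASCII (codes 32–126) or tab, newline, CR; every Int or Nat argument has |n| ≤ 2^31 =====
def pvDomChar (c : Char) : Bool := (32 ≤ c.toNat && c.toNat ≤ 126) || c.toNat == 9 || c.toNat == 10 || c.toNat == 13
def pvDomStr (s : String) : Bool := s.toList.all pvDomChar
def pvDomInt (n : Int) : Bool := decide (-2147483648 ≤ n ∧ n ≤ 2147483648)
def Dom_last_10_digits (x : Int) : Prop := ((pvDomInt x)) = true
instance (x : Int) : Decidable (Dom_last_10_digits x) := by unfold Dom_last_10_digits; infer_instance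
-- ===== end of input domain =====

-- B replaces A's fixed digit-extraction loop (build list, reverse, join, re-parse with int)
-- by the single closed-form remainder modulo ten to the tenth; same value for every integer.


-- ===== PORT A =====
-- A-side helper: an exact, step-for-step port of Python's int(s) parser.
-- (PySem.Int.ofStr? is the library primitive with the same algorithm; its internals are
-- private, so this inlined copy of the same algorithm is used instead — it is exact int()
-- semantics: strip int-whitespace, optional sign, decimal digits with '_' separators.)
def pyIntGo : List Char → Bool → Nat → Option Nat
  | [], afterDigit, acc => if afterDigit = true then some acc else none
  | c :: rest, afterDigit, acc =>
    if c.isDigit = true then pyIntGo rest true (acc * 10 + (c.toNat - '0'.toNat))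
    else
      if c = '_' ∧ afterDigit = true then
        match rest with
        | d :: tail => if d.isDigit = true then pyIntGo (d :: tail) false acc else none
        | [] => none
      else none

def pyIntDigitsVal? : List Char → Option Nat
  | [] => none
  | cs => pyIntGo cs false 0

def pyIntOfChars? (s : List Char) : Option Int :=
  match (List.dropWhile PySem.Int.isIntSpace (List.dropWhile PySem.Int.isIntSpace s).reverse).reverse with
  | '-' :: ds => Option.map (fun n => -n) ((pyIntDigitsVal? ds).map (fun a => (a : Int)))
  | '+' :: ds => Option.map (fun n => n) ((pyIntDigitsVal? ds).map (fun a => (a : Int)))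
  | ds => Option.map (fun n => n) ((pyIntDigitsVal? ds).map (fun a => (a : Int)))

-- the while loop: 'while len(digit_list) < 10: num = x % 10; x = x // 10; digit_list.append(num)'
def lastDigitsLoop (x : Int) (digitList : List Int) : List Int :=
  if digitList.length < 10 then
    lastDigitsLoop (PySem.Int.floordiv x 10) (digitList ++ [PySem.Int.mod x 10])
  else digitList
termination_by 10 - digitList.length

def last_10_digits (x : Int) : Int :=
  let digitList := lastDigitsLoop x []
  -- digit_list = [i for i in reversed(digit_list)]
  let digitList := digitList.reverse
  -- string = int("".join(map(str, digit_list)))   (the parse never fails: ten digit chars)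
  let string := PySem.Str.join "" (digitList.map PySem.Int.toStr)
  (pyIntOfChars? string.toList).getD 0

-- ===== PORT B =====
def last_10_digits_alt (x : Int) : Int := PySem.Int.mod x 10000000000

-- ===== PRECONDITION & SPEC =====
def Spec_last_10_digits (x : Int) (out : Int) : Prop := out = last_10_digits_alt x
instance (x : Int) (out : Int) : Decidable (Spec_last_10_digits x out) := by unfold Spec_last_10_digits; infer_instance

-- ===== CLAIM (what is proved, stated in full; the proofs are below) =====
def Claim_equal_last_10_digits : Prop := ∀ (x : Int), Dom_last_10_digits x → Spec_last_10_digits x (last_10_digits x)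

-- ===== LEMMAS AND PROOFS =====

-- proof-side helpers ------------------------------------------------------

-- the decimal digit character of a digit value 0..9
def charOfDigit (d : Int) : Char := Char.ofNat (48 + d.toNat)

-- the list [x % 10, (x//10) % 10, …] of the n low base-10 digits of x
def dfs (x : Int) : Nat → List Int
  | 0 => []
  | n + 1 => PySem.Int.mod x 10 :: dfs (PySem.Int.floordiv x 10) n

-- facts about digit characters -------------------------------------------

theorem charOfDigit_facts (d : Int) (h0 : 0 ≤ d) (h1 : d < 10) :
    (charOfDigit d).isDigit = true ∧ ((charOfDigit d).toNat - '0'.toNat) = d.toNat ∧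
    PySem.Int.isIntSpace (charOfDigit d) = false ∧ charOfDigit d ≠ '-' ∧ charOfDigit d ≠ '+' := by
  interval_cases d <;> decide

theorem toChars_digit (d : Int) (h0 : 0 ≤ d) (h1 : d < 10) :
    (PySem.Int.toStr d).toList = [charOfDigit d] := by
  interval_cases d <;> decide

-- the while loop computes dfs ---------------------------------------------

theorem dfs_succ (x : Int) (n : Nat) :
    dfs x (n + 1) = PySem.Int.mod x 10 :: dfs (PySem.Int.floordiv x 10) n := rfl

theorem mem_dfs (n : Nat) (x d : Int) (hd : d ∈ dfs x n) : 0 ≤ d ∧ d < 10 := by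
  induction n generalizing x with
  | zero => simp [dfs] at hd
  | succ n ih =>
    rcases hd with _ | ⟨_, hd⟩
    · exact ⟨PySem.Int.mod_nonneg _ (by norm_num), PySem.Int.mod_lt _ (by norm_num)⟩
    · exact ih _ hd

theorem lastDigitsLoop_eq (n : Nat) :
    ∀ (x : Int) (dl : List Int), dl.length + n = 10 →
      lastDigitsLoop x dl = dl ++ dfs x n := by
  induction n with
  | zero =>
    intro x dl h
    rw [lastDigitsLoop]
    simp [dfs]
    omega
  | succ n ih =>
    intro x dl h
    rw [lastDigitsLoop]
    rw [if_pos (by omega)]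
    rw [ih _ (dl ++ [PySem.Int.mod x 10]) (by simp; omega)]
    simp [dfs_succ]

-- the parser on all-digit strings ------------------------------------------

theorem pyIntGo_cons_digit (c : Char) (rest : List Char) (b : Bool) (acc : Nat)
    (h : c.isDigit = true) :
    pyIntGo (c :: rest) b acc = pyIntGo rest true (acc * 10 + (c.toNat - '0'.toNat)) := by
  rw [pyIntGo.eq_def]
  simp [h]

theorem pyIntGo_digits (ds : List Int) :
    ∀ (acc : Nat), (∀ d ∈ ds, 0 ≤ d ∧ d < 10) →
      pyIntGo (ds.map charOfDigit) true acc =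
        some (ds.foldl (fun a d => a * 10 + d.toNat) acc) := by
  induction ds with
  | nil => intro acc _; simp [pyIntGo]
  | cons d ds ih =>
    intro acc hmem
    obtain ⟨hdig, hval, _, _, _⟩ := charOfDigit_facts d (hmem d (by simp)).1 (hmem d (by simp)).2
    rw [List.map_cons, pyIntGo_cons_digit _ _ _ _ hdig, hval, List.foldl_cons]
    exact ih _ (fun e he => hmem e (by simp [he]))

theorem dropWhile_isIntSpace_eq_self (l : List Char)
    (h : ∀ c ∈ l, PySem.Int.isIntSpace c = false) :
    List.dropWhile PySem.Int.isIntSpace l = l := by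
  cases l with
  | nil => rfl
  | cons c l => simp [List.dropWhile, h c (by simp)]

theorem parse_digits (ds : List Int) (hne : ds ≠ [])
    (hmem : ∀ d ∈ ds, 0 ≤ d ∧ d < 10) :
    pyIntOfChars? (ds.map charOfDigit) =
      some ((ds.foldl (fun a d => a * 10 + d.toNat) 0 : Nat) : Int) := by
  have hns : ∀ c ∈ ds.map charOfDigit, PySem.Int.isIntSpace c = false := by
    intro c hc
    rcases List.mem_map.mp hc with ⟨d, hd, rfl⟩
    exact (charOfDigit_facts d (hmem d hd).1 (hmem d hd).2).2.2.1
  have hstrip :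
      (List.dropWhile PySem.Int.isIntSpace
        (List.dropWhile PySem.Int.isIntSpace (ds.map charOfDigit)).reverse).reverse
        = ds.map charOfDigit := by
    rw [dropWhile_isIntSpace_eq_self _ hns,
        dropWhile_isIntSpace_eq_self _ (by intro c hc; exact hns c (List.mem_reverse.mp hc)),
        List.reverse_reverse]
  cases ds with
  | nil => exact absurd rfl hne
  | cons d ds =>
    obtain ⟨hdig, hval, _, hm, hp⟩ := charOfDigit_facts d (hmem d (by simp)).1 (hmem d (by simp)).2
    unfold pyIntOfChars?
    rw [List.map_cons] at hstrip ⊢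
    rw [hstrip]
    have hgo : pyIntGo (charOfDigit d :: ds.map charOfDigit) false 0 =
        some ((d :: ds).foldl (fun a e => a * 10 + e.toNat) 0) := by
      rw [pyIntGo_cons_digit _ _ _ _ hdig, hval, List.foldl_cons]
      exact pyIntGo_digits ds _ (fun e he => hmem e (by simp [he]))
    -- head is a digit char, so neither '-' nor '+': the default branch fires
    split
    · next ds1 heq => injection heq with h1 _; exact absurd h1 hm
    · next ds1 heq => injection heq with h1 _; exact absurd h1 hp
    · next _ _ =>
        rw [show pyIntDigitsVal? (charOfDigit d :: List.map charOfDigit ds)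
              = pyIntGo (charOfDigit d :: List.map charOfDigit ds) false 0 from rfl, hgo]
        rfl

-- the numeric value of the digit list --------------------------------------

theorem emod_ten_succ (n : Nat) (x : Int) :
    x % (10 ^ (n + 1)) = (x / 10) % (10 ^ n) * 10 + x % 10 := by
  have hP : (0:Int) < 10 ^ n := by positivity
  have hx := Int.mul_ediv_add_emod x 10
  have hq := Int.mul_ediv_add_emod (x / 10) (10 ^ n)
  have hr0 := Int.emod_nonneg x (by norm_num : (10:Int) ≠ 0)
  have hr1 := Int.emod_lt_of_pos x (by norm_num : (0:Int) < 10)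
  have he0 := Int.emod_nonneg (x / 10) (by positivity : (10:Int)^n ≠ 0)
  have he1 := Int.emod_lt_of_pos (x / 10) hP
  have hxfull : x = 10 ^ (n + 1) * ((x / 10) / (10 ^ n))
      + ((x / 10) % (10 ^ n) * 10 + x % 10) := by
    rw [pow_succ]
    linear_combination (-1 : ℤ) * hx - 10 * hq
  conv_lhs => rw [hxfull, add_comm]
  rw [Int.add_mul_emod_self_left]
  exact Int.emod_eq_of_lt (by omega) (by rw [pow_succ]; omega)

theorem foldl_dfs_reverse (n : Nat) :
    ∀ (x : Int),
      (((dfs x n).reverse.foldl (fun a d => a * 10 + d.toNat) 0 : Nat) : Int)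
        = x % (10 ^ n) := by
  induction n with
  | zero => intro x; simp [dfs]
  | succ n ih =>
    intro x
    have hr0 := Int.emod_nonneg x (by norm_num : (10:Int) ≠ 0)
    rw [dfs_succ, List.reverse_cons, List.foldl_append]
    simp only [List.foldl_cons, List.foldl_nil]
    rw [emod_ten_succ]
    have hfd : PySem.Int.floordiv x 10 = x / 10 :=
      PySem.Int.floordiv_eq_ediv_of_pos (by norm_num)
    have hmd : PySem.Int.mod x 10 = x % 10 :=
      PySem.Int.mod_eq_emod_of_pos (by norm_num)
    push_cast
    rw [ih (PySem.Int.floordiv x 10), hfd, hmd]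
    rw [Int.toNat_of_nonneg hr0]

-- main ---------------------------------------------------------------------

theorem last_10_digits_eq (x : Int) : last_10_digits x = x % (10 ^ 10) := by
  have hloop : lastDigitsLoop x [] = dfs x 10 := by
    simpa using lastDigitsLoop_eq 10 x [] (by simp)
  have hmem : ∀ d ∈ (dfs x 10).reverse, 0 ≤ d ∧ d < 10 := fun d hd =>
    mem_dfs 10 x d (List.mem_reverse.mp hd)
  have hcons : dfs x 10 = PySem.Int.mod x 10 :: dfs (PySem.Int.floordiv x 10) 9 := rfl
  have hne : (dfs x 10).reverse ≠ [] := by rw [hcons]; simp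
  have hjoin : (PySem.Str.join "" (((dfs x 10).reverse).map PySem.Int.toStr)).toList
      = ((dfs x 10).reverse).map charOfDigit := by
    rw [PySem.Str.toList_join, List.map_map]
    have hmaps : ((dfs x 10).reverse).map (String.toList ∘ PySem.Int.toStr)
        = (((dfs x 10).reverse).map charOfDigit).map (fun c => [c]) := by
      rw [List.map_map]
      exact List.map_congr_left (fun d hd =>
        toChars_digit d (hmem d hd).1 (hmem d hd).2)
    rw [hmaps]
    exact PySem.Chars.join_nil_singletons _
  show (pyIntOfChars?
      (PySem.Str.join "" (((lastDigitsLoop x []).reverse).map PySem.Int.toStr)).toList).getD 0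
    = x % (10 ^ 10)
  rw [hloop, hjoin, parse_digits _ hne hmem, Option.getD_some]
  exact foldl_dfs_reverse 10 x

theorem last_10_digits_spec : Claim_equal_last_10_digits := by
  intro x _
  unfold Spec_last_10_digits
  rw [last_10_digits_eq]
  unfold last_10_digits_alt
  rw [PySem.Int.mod_eq_emod_of_pos (by norm_num)]
  norm_num
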